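-- pv_equiv track=rewrite | github.com/danpush/typical-tweet | main.py | reformat_tweets
-- ===== SOURCE A (Python) =====
-- def reformat_tweets(tweets: list) -> list:
--     """Return a list of tweets identical to <tweets> except all lowercase,
--     without links and with some other minor adjustments.
--
--     >>> tweets = ['Today is i monday #day', 'Earth #day is (tmrw &amp always)']
--     >>> reformat_tweets(tweets)
--     ['today is I monday #day', 'earth #day is tmrw and always']
--     """
--     new_tweets = []
--     for tweet in tweets:
--         words = tweet.lower().split(' ')
--         sentence = ''
--         for word in words:
--             if '@' not in word and 'https://' not in word:
--
--                 if '"' in word: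
--                     word = word.replace('"', '')
--                 if '(' in word:
--                     word = word.replace('(', '')
--                 if ')' in word:
--                     word = word.replace(')', '')
--                 if '&amp' in word:
--                     word = word.replace('&amp', 'and')
--                 if word == 'i':
--                     word == 'I'
--
--                 sentence += word + ' '
--         new_tweets.append(sentence[:-1])
--     return new_tweets
-- ===== SOURCE B (Python) =====
-- def reformat_tweets(tweets: list) -> list:
--     """Single pass per tweet: scan characters of the lowered tweet (with a
--     sentinel space) to cut words, drop mention/link words, and clean the rest
--     by filtering characters and one '&amp' substitution."""
--     result = []
--     for tweet in tweets:
--         kept = []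
--         raw = []
--         for ch in tweet.lower() + ' ':
--             if ch != ' ':
--                 raw.append(ch)
--                 continue
--             word = ''.join(raw)
--             raw = []
--             if '@' in word or 'https://' in word:
--                 continue
--             kept.append(''.join(c for c in word if c not in '"()').replace('&amp', 'and'))
--         result.append(' '.join(kept))
--     return result
-- ===== Notes on version B (the rewrite author's own statement) =====
-- stated objective: alternative
-- what changed: Replaces A's split-then-nested-word-loop with guarded str.replace calls by a single character-level scan per tweet: a sentinel space flushes a character buffer into words, link/mention words are dropped at flush time, and cleaning is a character filter plus one '&amp' substitution; the dead 'i'/'I' comparison is dropped.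
import Mathlib
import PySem

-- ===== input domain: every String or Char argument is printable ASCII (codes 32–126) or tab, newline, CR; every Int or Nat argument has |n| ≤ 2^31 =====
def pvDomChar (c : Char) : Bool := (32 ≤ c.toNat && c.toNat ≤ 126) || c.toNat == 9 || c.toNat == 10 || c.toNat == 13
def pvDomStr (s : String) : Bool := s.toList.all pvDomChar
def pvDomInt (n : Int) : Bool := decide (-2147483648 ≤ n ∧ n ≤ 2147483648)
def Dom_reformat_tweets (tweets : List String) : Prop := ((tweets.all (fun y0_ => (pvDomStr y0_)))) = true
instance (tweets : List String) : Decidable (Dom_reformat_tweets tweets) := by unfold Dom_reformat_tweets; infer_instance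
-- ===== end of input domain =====

-- B replaces A's split-then-nested-word-loop (guarded str.replace edits, 'word + space' accumulation,
-- chop of the trailing space) by a single character-level scan per tweet with a sentinel space that
-- flushes a buffer into words, dropping link/mention words at flush time and cleaning by a character
-- filter plus one '&amp' substitution; the dead 'i'/'I' comparison line is dropped.

-- ===== PORT A =====
-- A's conditional in-place edits of one word (the 'if word == "i": word == "I"' line of A
-- is a no-op comparison expression in Python and so has no computational content to port).
def editWordA (w : List Char) : List Char :=
  let w1 := if PySem.Chars.isIn "\"".toList w then PySem.Chars.replace w "\"".toList "".toList else w
  let w2 := if PySem.Chars.isIn "(".toList w1 then PySem.Chars.replace w1 "(".toList "".toList else w1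
  let w3 := if PySem.Chars.isIn ")".toList w2 then PySem.Chars.replace w2 ")".toList "".toList else w2
  if PySem.Chars.isIn "&amp".toList w3 then PySem.Chars.replace w3 "&amp".toList "and".toList else w3

def reformat_tweets (tweets : List String) : List String :=
  tweets.foldl (fun new_tweets tweet =>
    let words := PySem.Chars.splitOn (PySem.Chars.lower tweet.toList) " ".toList
    let sentence := words.foldl (fun s w =>
      if !PySem.Chars.isIn "@".toList w && !PySem.Chars.isIn "https://".toList w then
        s ++ editWordA w ++ " ".toList
      else s) []
    new_tweets ++ [String.ofList (PySem.List.slice sentence none (some (-1)))]) []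

-- ===== PORT B =====
-- clean at flush: character filter (c not in '"()') then the '&amp' -> 'and' substitution
def cleanWordB (w : List Char) : List Char :=
  PySem.Chars.replace (w.filter (fun c => !("\"()".toList.contains c))) "&amp".toList "and".toList

-- one scan step of B's character loop: state = (kept words, current raw buffer)
def stepB (st : List (List Char) × List Char) (ch : Char) : List (List Char) × List Char :=
  if ch ≠ ' ' then (st.1, st.2 ++ [ch])
  else
    let word := st.2
    if PySem.Chars.isIn "@".toList word || PySem.Chars.isIn "https://".toList word then (st.1, [])
    else (st.1 ++ [cleanWordB word], [])

def reformat_tweets_alt (tweets : List String) : List String :=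
  tweets.foldl (fun result tweet =>
    let st := (PySem.Chars.lower tweet.toList ++ " ".toList).foldl stepB ([], [])
    result ++ [String.ofList (PySem.Chars.join " ".toList st.1)]) []

-- ===== PRECONDITION & SPEC =====
def Spec_reformat_tweets (tweets : List String) (out : List String) : Prop := out = reformat_tweets_alt tweets
instance (tweets : List String) (out : List String) : Decidable (Spec_reformat_tweets tweets out) := by unfold Spec_reformat_tweets; infer_instance

-- ===== CLAIM =====
def Claim_equal_reformat_tweets : Prop := ∀ (tweets : List String), Dom_reformat_tweets tweets → Spec_reformat_tweets tweets (reformat_tweets tweets)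

-- ===== LEMMAS AND PROOFS =====

-- reference split on a single space, used only by the proofs
def sp : List Char → List (List Char)
  | [] => [[]]
  | c :: t => if c = ' ' then [] :: sp t else (sp t).modifyHead (c :: ·)

theorem modifyHead_id_list {α : Type} (l : List α) : List.modifyHead (fun x => x) l = l := by
  cases l <;> simp

theorem sp_ne_nil (l : List Char) : sp l ≠ [] := by
  cases l with
  | nil => simp [sp]
  | cons c t =>
    simp only [sp]
    split
    · simp
    · exact fun h => (sp_ne_nil t) (List.modifyHead_eq_nil_iff.mp h)

theorem sp_no_space (l : List Char) (h : ' ' ∉ l) : sp l = [l] := by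
  induction l with
  | nil => rfl
  | cons c t ih =>
    have hc : c ≠ ' ' := fun hc => h (hc ▸ List.mem_cons_self)
    simp only [sp, hc, ih (fun ht => h (List.mem_cons_of_mem _ ht))]
    rfl

theorem sp_append_space (a b : List Char) (h : ' ' ∉ a) : sp (a ++ ' ' :: b) = a :: sp b := by
  induction a with
  | nil => simp [sp]
  | cons c t ih =>
    have hc : c ≠ ' ' := fun hc => h (hc ▸ List.mem_cons_self)
    have ht : ' ' ∉ t := fun hm => h (List.mem_cons_of_mem _ hm)
    simp [sp, hc, ih ht]

-- splitOn by " " computes sp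
theorem splitOn_space_go (fuel : Nat) (l cur : List Char) (acc : List (List Char))
    (hf : l.length ≤ fuel) :
    PySem.Chars.splitOn.go " ".toList fuel l cur acc
      = acc.reverse ++ (sp l).modifyHead (cur.reverse ++ ·) := by
  induction fuel generalizing l cur acc with
  | zero =>
    have : l = [] := List.length_eq_zero_iff.mp (Nat.le_zero.mp hf)
    subst this
    simp [PySem.Chars.splitOn.go, sp]
  | succ n ih =>
    cases l with
    | nil => simp [PySem.Chars.splitOn.go, sp]
    | cons c t =>
      by_cases hc : c = ' '
      · subst hc
        have hpre : (" ".toList).isPrefixOf (' ' :: t) = true := by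
          simp [List.isPrefixOf]
        simp only [PySem.Chars.splitOn.go, hpre, if_pos]
        rw [ih _ _ _ (by simpa using Nat.le_of_succ_le_succ hf)]
        simp [sp, modifyHead_id_list]
      · have hpre : (" ".toList).isPrefixOf (c :: t) = false := by
          rw [Bool.eq_false_iff]
          intro hcp
          exact hc (((List.cons_prefix_cons).mp (List.isPrefixOf_iff_prefix.mp hcp)).1).symm
        simp only [PySem.Chars.splitOn.go, hpre, Bool.false_eq_true, if_false]
        rw [ih _ _ _ (by simpa using Nat.le_of_succ_le_succ hf)]
        obtain ⟨h0, t0, hsp⟩ := List.exists_cons_of_ne_nil (sp_ne_nil t)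
        simp [sp, hc, hsp]

theorem splitOn_space (l : List Char) : PySem.Chars.splitOn l " ".toList = sp l := by
  unfold PySem.Chars.splitOn
  rw [splitOn_space_go _ _ _ _ (by omega)]
  obtain ⟨h0, t0, hsp⟩ := List.exists_cons_of_ne_nil (sp_ne_nil l)
  simp [hsp]

-- replace with a single-char pattern and empty replacement is a character filter
theorem replace_single_go (c : Char) (fuel : Nat) (l acc : List Char) (hf : l.length ≤ fuel) :
    PySem.Chars.replace.go [c] [] fuel l acc = acc.reverse ++ l.filter (fun d => !(d == c)) := by
  induction fuel generalizing l acc with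
  | zero =>
    have : l = [] := List.length_eq_zero_iff.mp (Nat.le_zero.mp hf)
    subst this; simp [PySem.Chars.replace.go]
  | succ n ih =>
    cases l with
    | nil => simp [PySem.Chars.replace.go]
    | cons d t =>
      by_cases hd : d = c
      · subst hd
        have hpre : ([d].isPrefixOf (d :: t)) = true := by simp [List.isPrefixOf]
        simp only [PySem.Chars.replace.go, hpre, if_pos, List.reverse_nil, List.nil_append,
          List.length_cons, List.length_nil, List.drop_succ_cons, List.drop_zero]
        rw [ih t acc (by simpa using Nat.le_of_succ_le_succ hf)]
        simp
      · have hpre : ([c].isPrefixOf (d :: t)) = false := by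
          rw [Bool.eq_false_iff]
          intro hcp
          exact hd (((List.cons_prefix_cons).mp (List.isPrefixOf_iff_prefix.mp hcp)).1).symm
        simp only [PySem.Chars.replace.go, hpre, Bool.false_eq_true, if_false]
        rw [ih t (d :: acc) (by simpa using Nat.le_of_succ_le_succ hf)]
        simp [hd]

theorem replace_single (c : Char) (s : List Char) :
    PySem.Chars.replace s [c] [] = s.filter (fun d => !(d == c)) := by
  unfold PySem.Chars.replace
  simp only [List.isEmpty_cons, Bool.false_eq_true, if_false]
  simpa using replace_single_go c s.length s [] (le_refl _)

-- replace with a pattern that does not occur is the identity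
theorem replace_go_of_not_infix (old new : List Char) (fuel : Nat) (l acc : List Char)
    (_hold : old ≠ []) (h : ¬ old <:+: l) :
    PySem.Chars.replace.go old new fuel l acc = acc.reverse ++ l := by
  induction fuel generalizing l acc with
  | zero => simp [PySem.Chars.replace.go]
  | succ n ih =>
    cases l with
    | nil => simp [PySem.Chars.replace.go]
    | cons c t =>
      have hpre : old.isPrefixOf (c :: t) = false := by
        rw [Bool.eq_false_iff]
        intro hc
        exact h ((List.isPrefixOf_iff_prefix.mp hc).isInfix)
      have ht : ¬ old <:+: t := fun hi => h (hi.trans (List.infix_cons_iff.mpr (Or.inr (List.infix_rfl))))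
      simp only [PySem.Chars.replace.go, hpre, Bool.false_eq_true, if_false]
      rw [ih t (c :: acc) ht]
      simp

theorem replace_of_not_isIn (s old new : List Char) (hold : old ≠ [])
    (h : PySem.Chars.isIn old s = false) :
    PySem.Chars.replace s old new = s := by
  have hinf : ¬ old <:+: s := (PySem.Chars.isIn_eq_false_iff old s).mp h
  have he : old.isEmpty = false := by simp [hold]
  simp only [PySem.Chars.replace, he, Bool.false_eq_true, if_false]
  simpa using replace_go_of_not_infix old new s.length s [] hold hinf

theorem if_isIn_replace (p r w : List Char) (hp : p ≠ []) :
    (if PySem.Chars.isIn p w then PySem.Chars.replace w p r else w) = PySem.Chars.replace w p r := by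
  by_cases h : PySem.Chars.isIn p w
  · simp [h]
  · simp only [h, Bool.false_eq_true, if_false]
    exact (replace_of_not_isIn w p r hp (Bool.eq_false_iff.mpr h)).symm

theorem editWordA_eq_cleanWordB (w : List Char) : editWordA w = cleanWordB w := by
  unfold editWordA cleanWordB
  rw [if_isIn_replace _ _ _ (by decide), if_isIn_replace _ _ _ (by decide),
      if_isIn_replace _ _ _ (by decide), if_isIn_replace _ _ _ (by decide)]
  rw [show ("\"".toList) = ['"'] from rfl, show ("(".toList) = ['('] from rfl,
      show (")".toList) = [')'] from rfl, show ("".toList) = ([] : List Char) from rfl]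
  rw [replace_single, replace_single, replace_single, List.filter_filter, List.filter_filter]
  congr 1
  apply List.filter_congr
  intro d _
  rcases eq_or_ne d '"' with h | h
  · subst h; decide
  rcases eq_or_ne d '(' with h2 | h2
  · subst h2; decide
  rcases eq_or_ne d ')' with h3 | h3
  · subst h3; decide
  simp [h, h2, h3]

def keepB (w : List Char) : Bool :=
  !(PySem.Chars.isIn "@".toList w || PySem.Chars.isIn "https://".toList w)

theorem stepB_space (kept : List (List Char)) (raw : List Char) :
    stepB (kept, raw) ' ' = if keepB raw then (kept ++ [cleanWordB raw], []) else (kept, []) := by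
  unfold stepB keepB
  cases h1 : PySem.Chars.isIn "@".toList raw <;>
    cases h2 : PySem.Chars.isIn "https://".toList raw <;>
    simp only [show ("@".toList) = ['@'] from rfl,
      show ("https://".toList) = ['h','t','t','p','s',':','/','/'] from rfl] at h1 h2 <;>
    simp [h1, h2]

theorem stepB_nonspace (kept : List (List Char)) (raw : List Char) (c : Char) (hc : c ≠ ' ') :
    stepB (kept, raw) c = (kept, raw ++ [c]) := by
  unfold stepB; simp [hc]

-- B's character scan computes clean/filter over the space-split words
theorem scanB (l : List Char) (kept : List (List Char)) (raw : List Char) (hraw : ' ' ∉ raw) :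
    (l ++ " ".toList).foldl stepB (kept, raw)
      = (kept ++ ((sp (raw ++ l)).filter keepB).map cleanWordB, []) := by
  induction l generalizing kept raw with
  | nil =>
    rw [List.append_nil, sp_no_space raw hraw]
    show List.foldl stepB (kept, raw) [' '] = _
    rw [List.foldl_cons, List.foldl_nil, stepB_space]
    by_cases hk : keepB raw = true
    · simp [hk, List.filter]
    · rw [if_neg hk]
      simp only [Bool.not_eq_true] at hk
      simp [hk, List.filter]
  | cons c t ih =>
    by_cases hc : c = ' '
    · subst hc
      rw [sp_append_space raw t hraw]
      simp only [List.cons_append, List.foldl_cons]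
      rw [stepB_space]
      by_cases hk : keepB raw = true
      · rw [if_pos hk, ih (kept ++ [cleanWordB raw]) [] (by simp)]
        simp [hk, List.filter]
      · rw [if_neg hk, ih kept [] (by simp)]
        simp only [Bool.not_eq_true] at hk
        simp [hk, List.filter]
    · simp only [List.cons_append, List.foldl_cons]
      rw [stepB_nonspace kept raw c hc]
      rw [ih kept (raw ++ [c]) (by simp [hraw, Ne.symm hc])]
      simp

-- the inner accumulation loop of A builds the concatenation of 'edited word + space' over kept words
theorem sentence_foldl (ws : List (List Char)) (s0 : List Char) :
    ws.foldl (fun s w => if keepB w then s ++ editWordA w ++ " ".toList else s) s0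
      = s0 ++ (ws.filter keepB).flatMap (fun w => editWordA w ++ " ".toList) := by
  induction ws generalizing s0 with
  | nil => simp
  | cons a t ih =>
    by_cases h : keepB a = true
    · rw [List.foldl_cons, if_pos h, ih, List.filter_cons_of_pos h, List.flatMap_cons]
      simp [List.append_assoc]
    · rw [List.foldl_cons, if_neg h, ih, List.filter_cons_of_neg (by simpa using h)]

-- chopping the trailing space of that concatenation is exactly join-with-space
theorem dropLast_flatMap_space (f : List Char → List Char) (ks : List (List Char)) :
    (ks.flatMap (fun w => f w ++ " ".toList)).dropLast
      = PySem.Chars.join " ".toList (ks.map f) := by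
  induction ks with
  | nil => simp [PySem.Chars.join_nil]
  | cons a t ih =>
    cases t with
    | nil => simp [PySem.Chars.join_singleton]
    | cons b t' =>
      have hne : ((b :: t').flatMap (fun w => f w ++ " ".toList)) ≠ [] := by
        simp [List.flatMap_cons]
      rw [List.flatMap_cons, List.dropLast_append_of_ne_nil hne, ih]
      simp [PySem.Chars.join_cons_cons, List.append_assoc]

theorem per_tweet (tweet : String) :
    String.ofList (PySem.List.slice
      ((PySem.Chars.splitOn (PySem.Chars.lower tweet.toList) " ".toList).foldl
        (fun s w => if !PySem.Chars.isIn "@".toList w && !PySem.Chars.isIn "https://".toList w then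
            s ++ editWordA w ++ " ".toList else s) []) none (some (-1)))
      = String.ofList (PySem.Chars.join " ".toList
          (((PySem.Chars.lower tweet.toList ++ " ".toList).foldl stepB ([], [])).1)) := by
  rw [scanB _ [] [] (by simp)]
  simp only [List.nil_append]
  have hcond : (fun (s w : List Char) =>
        if !PySem.Chars.isIn "@".toList w && !PySem.Chars.isIn "https://".toList w then
          s ++ editWordA w ++ " ".toList else s)
      = (fun (s w : List Char) => if keepB w then s ++ editWordA w ++ " ".toList else s) := by
    funext s w
    have hb : (!PySem.Chars.isIn "@".toList w && !PySem.Chars.isIn "https://".toList w) = keepB w := by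
      unfold keepB
      cases PySem.Chars.isIn "@".toList w <;> cases PySem.Chars.isIn "https://".toList w <;> rfl
    rw [hb]
  rw [hcond, sentence_foldl, List.nil_append, PySem.List.slice_to_neg_one, splitOn_space,
      dropLast_flatMap_space]
  exact congrArg String.ofList (congrArg (PySem.Chars.join " ".toList)
    (List.map_congr_left (fun w _ => editWordA_eq_cleanWordB w)))

theorem foldl_append_map {α β : Type} (g : α → β) (l : List α) (acc : List β) :
    l.foldl (fun acc x => acc ++ [g x]) acc = acc ++ l.map g := by
  induction l generalizing acc with
  | nil => simp
  | cons a t ih => simp [ih]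

-- ===== VERDICT =====
theorem reformat_tweets_spec : Claim_equal_reformat_tweets := by
  intro tweets _
  unfold Spec_reformat_tweets reformat_tweets reformat_tweets_alt
  rw [foldl_append_map, foldl_append_map]
  simp only [List.nil_append]
  exact List.map_congr_left (fun t _ => per_tweet t)
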